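-- pv_equiv track=rewrite | github.com/Kranthi-L/RAG-Chatbot | ingest.py | parse_ranges
-- ===== SOURCE A (Python) =====
-- from typing import List, Optional, Tuple
--
-- def parse_ranges(spec: str, max_pages: int) -> List[int]:
--     """
--     Parse a string like "1-40, 120-150, 200" (1-based page numbers) into
--     a sorted list of 0-based page indices. If spec is empty/None, return [].
--     """
--     pages = set()
--     if not spec:
--         return []
--     for part in spec.split(","):
--         part = part.strip()
--         if not part:
--             continue
--         if "-" in part:
--             a, b = part.split("-", 1)
--             a, b = max(1, int(a)), min(max_pages, int(b))
--             pages.update(range(a, b + 1))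
--         else:
--             p = max(1, min(max_pages, int(part)))
--             pages.add(p)
--     # convert to zero-based indices
--     return sorted([p - 1 for p in pages])
-- ===== SOURCE B (Python) =====
-- from typing import List, Optional, Tuple
--
--
-- def _merge_union(xs, ys):
--     """Union of two strictly increasing int lists, strictly increasing."""
--     out = []
--     i = j = 0
--     while i < len(xs) and j < len(ys):
--         if xs[i] < ys[j]:
--             out.append(xs[i]); i += 1
--         elif ys[j] < xs[i]:
--             out.append(ys[j]); j += 1
--         else:
--             out.append(xs[i]); i += 1; j += 1
--     out.extend(xs[i:])
--     out.extend(ys[j:])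
--     return out
--
--
-- def _interval(part: str, max_pages: int) -> Optional[Tuple[int, int]]:
--     """Clamped 1-based page interval of one comma-separated piece, None if blank."""
--     text = part.strip()
--     if not text:
--         return None
--     if "-" in text:
--         a, b = text.split("-", 1)
--         return max(1, int(a)), min(max_pages, int(b))
--     p = max(1, min(max_pages, int(text)))
--     return p, p
--
--
-- def parse_ranges(spec: str, max_pages: int) -> List[int]:
--     """
--     Parse a string like "1-40, 120-150, 200" (1-based page numbers) into
--     a sorted list of 0-based page indices. If spec is empty/None, return [].
--     Keeps a sorted duplicate-free list throughout by merging each clamped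
--     interval's run of pages into it, instead of a set plus a final sort.
--     """
--     if not spec:
--         return []
--     acc = []
--     for part in spec.split(","):
--         iv = _interval(part, max_pages)
--         if iv is not None:
--             acc = _merge_union(acc, list(range(iv[0], iv[1] + 1)))
--     return [p - 1 for p in acc]
-- ===== Notes on version B (the rewrite author's own statement) =====
-- stated objective: alternative
-- what changed: B keeps a sorted duplicate-free list and merges each clamped interval's page run into it with a linear sorted-merge union, instead of A's accumulating a hash set of individual pages and sorting it at the end.
import Mathlib
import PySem

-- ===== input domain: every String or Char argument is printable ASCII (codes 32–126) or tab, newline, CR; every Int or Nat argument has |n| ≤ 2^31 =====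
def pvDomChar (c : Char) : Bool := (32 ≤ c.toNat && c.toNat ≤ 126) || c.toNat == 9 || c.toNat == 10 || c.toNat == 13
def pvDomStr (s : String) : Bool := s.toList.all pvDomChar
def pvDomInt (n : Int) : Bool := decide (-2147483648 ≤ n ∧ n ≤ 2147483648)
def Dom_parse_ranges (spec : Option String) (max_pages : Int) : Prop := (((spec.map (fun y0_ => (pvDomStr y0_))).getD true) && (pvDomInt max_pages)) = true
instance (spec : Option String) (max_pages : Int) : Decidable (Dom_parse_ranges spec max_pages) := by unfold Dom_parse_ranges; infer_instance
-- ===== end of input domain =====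

-- B replaces A's set-of-points plus final sort by an always-sorted duplicate-free
-- list into which each clamped interval is merged (sorted-merge union); same values.

-- ===== PORT A =====
-- the loop body of A: state = some pages, or none once int() has raised (outside Pre_)
def pvStepA (max_pages : Int) (st : Option (PySem.Set Int)) (part : String) :
    Option (PySem.Set Int) :=
  match st with
  | none => none
  | some pages =>
    let t := PySem.Str.strip part
    if t = "" then some pages
    else if PySem.Str.isIn "-" t then
      match PySem.Str.splitMax? t "-" 1 with
      | some [a, b] =>
        match PySem.Int.ofStr? a, PySem.Int.ofStr? b with
        | some av, some bv =>
            some (PySem.Set.update pages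
              (PySem.List.pyRange (max 1 av) (min max_pages bv + 1) 1))
        | _, _ => none
      | _ => none
    else
      match PySem.Int.ofStr? t with
      | some p => some (PySem.Set.add pages (max 1 (min max_pages p)))
      | none => none

def parse_ranges (spec : Option String) (max_pages : Int) : List Int :=
  match spec with
  | none => []
  | some s =>
    if s = "" then []
    else
      match ((PySem.Str.split? s ",").getD []).foldl (pvStepA max_pages)
          (some (PySem.Set.empty : PySem.Set Int)) with
      | none => []   -- int() raised a ValueError: excluded by Pre_parse_ranges
      | some pages =>
          PySem.List.sorted (pages.map (fun p => p - 1)) (fun x => x) false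

-- ===== PORT B =====
-- union of two strictly increasing lists, strictly increasing
def pvMergeUnion : List Int → List Int → List Int
  | [], ys => ys
  | x :: xs, [] => x :: xs
  | x :: xs, y :: ys =>
    if x < y then x :: pvMergeUnion xs (y :: ys)
    else if y < x then y :: pvMergeUnion (x :: xs) ys
    else x :: pvMergeUnion xs ys
  termination_by xs ys => xs.length + ys.length

-- _interval: none = int() raised (ValueError, outside Pre_), some none = blank part,
-- some (some (lo, hi)) = the clamped 1-based interval of this piece
def pvInterval (part : String) (max_pages : Int) : Option (Option (Int × Int)) :=
  let text := PySem.Str.strip part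
  if text = "" then some none
  else if PySem.Str.isIn "-" text then
    match PySem.Str.splitMax? text "-" 1 with
    | some [a, b] =>
      match PySem.Int.ofStr? a, PySem.Int.ofStr? b with
      | some av, some bv => some (some (max 1 av, min max_pages bv))
      | _, _ => none
    | _ => none
  else
    match PySem.Int.ofStr? text with
    | some p => some (some (max 1 (min max_pages p), max 1 (min max_pages p)))
    | none => none

-- the loop body of B: state = some acc (sorted, duplicate-free), none once int() raised
def pvStepB (max_pages : Int) (st : Option (List Int)) (part : String) :
    Option (List Int) :=
  match st with
  | none => none
  | some acc =>
    match pvInterval part max_pages with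
    | none => none
    | some none => some acc
    | some (some (lo, hi)) =>
        some (pvMergeUnion acc (PySem.List.pyRange lo (hi + 1) 1))

def parse_ranges_alt (spec : Option String) (max_pages : Int) : List Int :=
  match spec with
  | none => []
  | some s =>
    if s = "" then []
    else
      match ((PySem.Str.split? s ",").getD []).foldl (pvStepB max_pages)
          (some ([] : List Int)) with
      | none => []   -- int() raised a ValueError: excluded by Pre_parse_ranges
      | some acc => acc.map (fun p => p - 1)

-- ===== PRECONDITION & SPEC =====
-- a comma-separated part on which A's int() calls succeed (or which is skipped)
def pvPartOK (part : String) : Bool :=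
  let t := PySem.Str.strip part
  if t = "" then true
  else if PySem.Str.isIn "-" t then
    match PySem.Str.splitMax? t "-" 1 with
    | some [a, b] => (PySem.Int.ofStr? a).isSome && (PySem.Int.ofStr? b).isSome
    | _ => false
  else (PySem.Int.ofStr? t).isSome

-- Pre_ excludes exactly the inputs on which A raises ValueError: some non-blank
-- comma-separated part whose number(s) are not parseable by int().
def Pre_parse_ranges (spec : Option String) (max_pages : Int) : Prop :=
  ((PySem.Str.split? (spec.getD "") ",").getD []).all pvPartOK = true
instance (spec : Option String) (max_pages : Int) : Decidable (Pre_parse_ranges spec max_pages) := by unfold Pre_parse_ranges; infer_instance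

def pvWitness_parse_ranges : Option String × Int := (some "1-4, 9, 3-5,  ,2", 10)

def Spec_parse_ranges (spec : Option String) (max_pages : Int) (out : List Int) : Prop := out = parse_ranges_alt spec max_pages
instance (spec : Option String) (max_pages : Int) (out : List Int) : Decidable (Spec_parse_ranges spec max_pages out) := by unfold Spec_parse_ranges; infer_instance

-- ===== CLAIM (what is proved, stated in full; the proofs are below) =====
def Claim_equal_parse_ranges : Prop := ∀ (spec : Option String) (max_pages : Int), Dom_parse_ranges spec max_pages → Pre_parse_ranges spec max_pages → Spec_parse_ranges spec max_pages (parse_ranges spec max_pages)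

-- ===== LEMMAS AND PROOFS =====

lemma mem_pvMergeUnion (xs ys : List Int) (z : Int) :
    z ∈ pvMergeUnion xs ys ↔ z ∈ xs ∨ z ∈ ys := by
  induction xs, ys using pvMergeUnion.induct with
  | case1 ys => simp [pvMergeUnion]
  | case2 x xs => simp [pvMergeUnion]
  | case3 x xs y ys h ih => simp only [pvMergeUnion, if_pos h, List.mem_cons, ih]; tauto
  | case4 x xs y ys h1 h2 ih =>
      simp only [pvMergeUnion, if_neg h1, if_pos h2, List.mem_cons, ih]; tauto
  | case5 x xs y ys h1 h2 ih =>
      have hxy : x = y := by omega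
      subst hxy
      simp only [pvMergeUnion, if_neg (lt_irrefl x), List.mem_cons, ih]; tauto

lemma pairwise_pvMergeUnion (xs ys : List Int)
    (hx : xs.Pairwise (· < ·)) (hy : ys.Pairwise (· < ·)) :
    (pvMergeUnion xs ys).Pairwise (· < ·) := by
  induction xs, ys using pvMergeUnion.induct with
  | case1 ys => simpa [pvMergeUnion] using hy
  | case2 x xs => simpa [pvMergeUnion] using hx
  | case3 x xs y ys h ih =>
      rw [List.pairwise_cons] at hx
      simp only [pvMergeUnion, if_pos h, List.pairwise_cons]
      refine ⟨?_, ih hx.2 hy⟩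
      intro z hz
      rcases (mem_pvMergeUnion _ _ _).1 hz with hzx | hzy
      · exact hx.1 z hzx
      · rcases List.mem_cons.1 hzy with rfl | hzys
        · exact h
        · exact lt_trans h ((List.pairwise_cons.1 hy).1 z hzys)
  | case4 x xs y ys h1 h2 ih =>
      rw [List.pairwise_cons] at hy
      simp only [pvMergeUnion, if_neg h1, if_pos h2, List.pairwise_cons]
      refine ⟨?_, ih hx hy.2⟩
      intro z hz
      rcases (mem_pvMergeUnion _ _ _).1 hz with hzx | hzy
      · rcases List.mem_cons.1 hzx with rfl | hzxs
        · exact h2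
        · exact lt_trans h2 ((List.pairwise_cons.1 hx).1 z hzxs)
      · exact hy.1 z hzy
  | case5 x xs y ys h1 h2 ih =>
      have hxy : x = y := by omega
      subst hxy
      rw [List.pairwise_cons] at hx
      rw [List.pairwise_cons] at hy
      simp only [pvMergeUnion, if_neg (lt_irrefl x), List.pairwise_cons]
      refine ⟨?_, ih hx.2 hy.2⟩
      intro z hz
      rcases (mem_pvMergeUnion _ _ _).1 hz with hzx | hzy
      · exact hx.1 z hzx
      · exact hy.1 z hzy

-- the relation the two fold states keep in step
def pvRel (oa : Option (PySem.Set Int)) (ob : Option (List Int)) : Prop :=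
  (oa = none ∧ ob = none) ∨
  ∃ S L, oa = some S ∧ ob = some L ∧ S.Nodup ∧ L.Pairwise (· < ·) ∧ ∀ z, z ∈ L ↔ z ∈ S

lemma pvRel_step (mp : Int) (part : String) {oa ob} (h : pvRel oa ob) :
    pvRel (pvStepA mp oa part) (pvStepB mp ob part) := by
  rcases h with ⟨rfl, rfl⟩ | ⟨S, L, rfl, rfl, hS, hL, hext⟩
  · exact Or.inl ⟨rfl, rfl⟩
  · simp only [pvStepA, pvStepB, pvInterval]
    by_cases ht : PySem.Str.strip part = ""
    · simp only [ht, reduceIte]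
      exact Or.inr ⟨S, L, rfl, rfl, hS, hL, hext⟩
    · simp only [if_neg ht]
      by_cases hd : PySem.Str.isIn "-" (PySem.Str.strip part) = true
      · simp only [hd, reduceIte]
        cases hsp : PySem.Str.splitMax? (PySem.Str.strip part) "-" 1 with
        | none => exact Or.inl ⟨rfl, rfl⟩
        | some l =>
          match l with
          | [] => exact Or.inl ⟨rfl, rfl⟩
          | [a] => exact Or.inl ⟨rfl, rfl⟩
          | a :: b :: c :: r => exact Or.inl ⟨rfl, rfl⟩
          | [a, b] =>
            cases hav : PySem.Int.ofStr? a with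
            | none => simp only [hav]; exact Or.inl ⟨rfl, rfl⟩
            | some av =>
              cases hbv : PySem.Int.ofStr? b with
              | none => simp only [hav, hbv]; exact Or.inl ⟨rfl, rfl⟩
              | some bv =>
                simp only [hav, hbv]
                refine Or.inr ⟨_, _, rfl, rfl, PySem.Set.nodup_update _ _ hS,
                  pairwise_pvMergeUnion _ _ hL (PySem.List.pairwise_lt_pyRange_one _ _), ?_⟩
                intro z
                rw [mem_pvMergeUnion, PySem.Set.mem_update, hext]
      · simp only [hd]
        cases hp : PySem.Int.ofStr? (PySem.Str.strip part) with
        | none => simp only [Bool.false_eq_true, if_false]; exact Or.inl ⟨rfl, rfl⟩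
        | some p =>
          simp only [Bool.false_eq_true, if_false]
          refine Or.inr ⟨_, _, rfl, rfl, PySem.Set.nodup_add _ _ hS,
            pairwise_pvMergeUnion _ _ hL (PySem.List.pairwise_lt_pyRange_one _ _), ?_⟩
          intro z
          rw [mem_pvMergeUnion, PySem.Set.mem_add, hext, PySem.List.mem_pyRange_one]
          constructor
          · rintro (h | h) ; exact Or.inl h; exact Or.inr (by omega)
          · rintro (h | h) ; exact Or.inl h; exact Or.inr (by omega)

lemma pvRel_foldl (mp : Int) (parts : List String) {oa ob} (h : pvRel oa ob) :
    pvRel (parts.foldl (pvStepA mp) oa) (parts.foldl (pvStepB mp) ob) := by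
  induction parts generalizing oa ob with
  | nil => exact h
  | cons p ps ih => exact ih (pvRel_step mp p h)

-- ===== VERDICT (by name: the statement is the Claim_ definition above) =====
theorem parse_ranges_spec : Claim_equal_parse_ranges := by
  intro spec max_pages _hdom _hpre
  unfold Spec_parse_ranges parse_ranges parse_ranges_alt
  cases spec with
  | none => rfl
  | some s =>
    by_cases hs : s = ""
    · simp [hs]
    · simp only [if_neg hs]
      have h0 : pvRel (some (PySem.Set.empty : PySem.Set Int)) (some ([] : List Int)) :=
        Or.inr ⟨_, _, rfl, rfl, List.nodup_nil, List.Pairwise.nil, by simp [PySem.Set.empty]⟩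
      have h := pvRel_foldl max_pages ((PySem.Str.split? s ",").getD []) h0
      rcases h with ⟨ha, hb⟩ | ⟨S, L, ha, hb, hS, hL, hext⟩
      · rw [ha, hb]
      · rw [ha, hb]
        have hperm : (L.map (fun p => p - 1)).Perm (S.map (fun p => p - 1)) := by
          refine List.Perm.map _ ?_
          exact (List.perm_ext_iff_of_nodup (List.Pairwise.nodup hL) hS).2 hext
        have hpw : (L.map (fun p => p - 1)).Pairwise (fun a b => a < b) := by
          rw [List.pairwise_map]
          exact hL.imp (by omega)
        exact PySem.List.sorted_eq_of_perm_of_pairwise_lt _ _ _ hperm hpw
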